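-- pv_equiv track=rewrite | github.com/okyanusatlas/coderbyte-python | 07_simple_symbols.py | simple_symbols
-- ===== SOURCE A (Python) =====
-- def simple_symbols(word):
--     words = list(word)
--     plus_counter = 0
--     for word in words:
--         if word == "+":
--             plus_counter += 1
--         if 96 < ord(word) < 123:
--             if plus_counter == 0:
--                 return False
--             elif plus_counter >= 1:
--                 plus_counter = 0
--
--     return plus_counter >= 1
-- ===== SOURCE B (Python) =====
-- def simple_symbols(word):
--     for i, c in enumerate(word):
--         if 'a' <= c <= 'z':
--             return '+' in word[:i] and simple_symbols(word[i + 1:])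
--     return '+' in word
-- ===== Notes on version B (the rewrite author's own statement) =====
-- stated objective: alternative
-- what changed: Replaced the running plus-counter with its reset flag by a recursive decomposition: find the first lowercase letter, require a plus sign in the prefix before it, and recurse on the suffix after it (the no-letter base case returns whether any plus sign occurs).
import Mathlib
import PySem

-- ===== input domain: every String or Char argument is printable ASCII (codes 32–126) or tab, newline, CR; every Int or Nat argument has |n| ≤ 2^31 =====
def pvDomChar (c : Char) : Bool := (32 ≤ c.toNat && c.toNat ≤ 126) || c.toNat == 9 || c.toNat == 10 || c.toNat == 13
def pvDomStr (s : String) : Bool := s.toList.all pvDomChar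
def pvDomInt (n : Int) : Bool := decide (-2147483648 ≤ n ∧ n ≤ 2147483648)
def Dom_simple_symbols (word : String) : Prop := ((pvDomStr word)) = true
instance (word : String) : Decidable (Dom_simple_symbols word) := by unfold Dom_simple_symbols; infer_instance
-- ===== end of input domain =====

-- B replaces A's running '+'-counter by a recursive first-letter/prefix/suffix decomposition (alternative, same cost).

-- ===== PORT A =====
-- loop over the chars with the plus counter; `none` = early `return False`,
-- `some c` = loop finished with counter c
def simple_symbols_loop : List Char → Int → Option Int
  | [], c => some c
  | ch :: rest, c =>
    let c := if ch = '+' then c + 1 else c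
    if 96 < (ch.toNat : Int) ∧ (ch.toNat : Int) < 123 then
      if c = 0 then none
      else simple_symbols_loop rest 0
    else simple_symbols_loop rest c

def simple_symbols (word : String) : Bool :=
  match simple_symbols_loop word.toList 0 with
  | none => false
  | some c => c ≥ 1

-- ===== PORT B =====
-- Source B: scan for the first lowercase letter (index i); if none, return '+' in word;
-- else return ('+' in word[:i]) and simple_symbols(word[i+1:])
lemma pv_drop_lt (cs : List Char) (i : Nat)
    (h : cs.findIdx? (fun c => decide ('a' ≤ c) && decide (c ≤ 'z')) = some i) :
    (cs.drop (i + 1)).length < cs.length := by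
  have hi : i < cs.length := List.findIdx?_eq_some_iff_findIdx_eq.mp h |>.1
  simp [List.length_drop]; omega

def simple_symbols_alt_go (cs : List Char) : Bool :=
  match h : cs.findIdx? (fun c => decide ('a' ≤ c) && decide (c ≤ 'z')) with
  | none => cs.contains '+'
  | some i => (cs.take i).contains '+' && simple_symbols_alt_go (cs.drop (i + 1))
termination_by cs.length
decreasing_by exact pv_drop_lt cs i h

def simple_symbols_alt (word : String) : Bool := simple_symbols_alt_go word.toList

-- ===== PRECONDITION & SPEC =====
def Spec_simple_symbols (word : String) (out : Bool) : Prop := out = simple_symbols_alt word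
instance (word : String) (out : Bool) : Decidable (Spec_simple_symbols word out) := by unfold Spec_simple_symbols; infer_instance

-- ===== CLAIM (what is proved, stated in full; the proofs are below) =====
def Claim_equal_simple_symbols : Prop := ∀ (word : String), Dom_simple_symbols word → Spec_simple_symbols word (simple_symbols word)

-- ===== LEMMAS AND PROOFS =====

-- the two letter tests (96 < ord < 123 vs 'a' <= c <= 'z') agree
lemma pv_letter_iff (ch : Char) :
    (96 < (ch.toNat : Int) ∧ (ch.toNat : Int) < 123) ↔ ('a' ≤ ch ∧ ch ≤ 'z') := by
  rw [Char.le_def, Char.le_def, UInt32.le_iff_toNat_le, UInt32.le_iff_toNat_le]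
  have h1 : ('a').val.toNat = 97 := by decide
  have h2 : ('z').val.toNat = 122 := by decide
  have h3 : ch.toNat = ch.val.toNat := rfl
  omega

lemma pv_letter_ne_plus (ch : Char) (h : 'a' ≤ ch ∧ ch ≤ 'z') : ch ≠ '+' := by
  rintro rfl
  rw [Char.le_def, UInt32.le_iff_toNat_le] at h
  exact absurd h.1 (by decide)

lemma pv_mem_iff_countP (l : List Char) : ('+' ∈ l) ↔ l.countP (· == '+') ≠ 0 := by
  constructor
  · intro h
    have : 0 < l.countP (· == '+') := List.countP_pos_iff.mpr ⟨'+', h, by simp⟩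
    omega
  · intro h
    obtain ⟨a, ha, hpa⟩ := List.countP_pos_iff.mp (Nat.pos_of_ne_zero h)
    simp only [beq_iff_eq] at hpa
    exact hpa ▸ ha

-- skipping a non-letter prefix just accumulates its '+' count
lemma pv_loop_prefix (pre rest : List Char) (c : Int)
    (hp : ∀ ch ∈ pre, ¬ ('a' ≤ ch ∧ ch ≤ 'z')) :
    simple_symbols_loop (pre ++ rest) c
      = simple_symbols_loop rest (c + (pre.countP (· == '+') : Int)) := by
  induction pre generalizing c with
  | nil => simp
  | cons ch tl ih =>
    have hch : ¬ ('a' ≤ ch ∧ ch ≤ 'z') := hp ch (by simp)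
    have hno : ¬ (96 < (ch.toNat : Int) ∧ (ch.toNat : Int) < 123) := by
      rw [pv_letter_iff]; exact hch
    simp only [List.cons_append, simple_symbols_loop, if_neg hno]
    rw [ih _ (fun x hx => hp x (by simp [hx]))]
    by_cases h : ch = '+'
    · simp [h]
      ring_nf
    · simp [h]

-- at a letter: return False if the counter is 0, else reset and continue
lemma pv_loop_letter (ch : Char) (rest : List Char) (c : Int)
    (h : 'a' ≤ ch ∧ ch ≤ 'z') :
    simple_symbols_loop (ch :: rest) c
      = if c = 0 then none else simple_symbols_loop rest 0 := by
  have hyes : 96 < (ch.toNat : Int) ∧ (ch.toNat : Int) < 123 := (pv_letter_iff ch).mpr h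
  simp only [simple_symbols_loop, if_neg (pv_letter_ne_plus ch h), if_pos hyes]

lemma pv_main (cs : List Char) :
    simple_symbols_alt_go cs
      = (match simple_symbols_loop cs 0 with
          | none => false
          | some c => decide (c ≥ 1)) := by
  induction hn : cs.length using Nat.strong_induction_on generalizing cs with
  | _ n ih =>
  rw [simple_symbols_alt_go]
  split
  next hfind =>
    -- no lowercase letter in cs: A just counts the '+'s and checks >= 1
    have hall : ∀ ch ∈ cs, ¬ ('a' ≤ ch ∧ ch ≤ 'z') := by
      intro ch hch
      have := List.findIdx?_eq_none_iff.mp hfind ch hch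
      simpa using this
    have hL := pv_loop_prefix cs [] 0 hall
    simp only [List.append_nil] at hL
    rw [hL]
    simp only [simple_symbols_loop]
    by_cases hmem : '+' ∈ cs
    · have hc := (pv_mem_iff_countP cs).mp hmem
      simp [hmem]
    · have h0 : cs.countP (· == '+') = 0 := by
        by_contra hne; exact hmem ((pv_mem_iff_countP cs).mpr hne)
      simp [hmem, h0]
  next i hfind =>
    obtain ⟨hi, hpi, hlt⟩ := List.findIdx?_eq_some_iff_getElem.mp hfind
    have hletter : 'a' ≤ cs[i] ∧ cs[i] ≤ 'z' := by simpa using hpi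
    have hpre : ∀ ch ∈ cs.take i, ¬ ('a' ≤ ch ∧ ch ≤ 'z') := by
      intro ch hch
      obtain ⟨j, hj, rfl⟩ := List.mem_iff_getElem.mp hch
      have hjlen : j < i := by
        have := hj; simp [List.length_take] at this; omega
      have hnp := hlt j hjlen
      rw [List.getElem_take]
      simpa using hnp
    have hdecomp : cs = cs.take i ++ cs[i] :: cs.drop (i + 1) := by
      conv_lhs => rw [← List.take_append_drop i cs]
      rw [List.drop_eq_getElem_cons hi]
    conv_rhs => rw [hdecomp]
    rw [pv_loop_prefix _ _ 0 hpre, pv_loop_letter _ _ _ hletter]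
    have hih := ih (cs.drop (i + 1)).length
        (by simp [List.length_drop]; omega) (cs.drop (i + 1)) rfl
    by_cases hz : (0 : Int) + ((cs.take i).countP (· == '+') : Int) = 0
    · have hnmem : ¬ '+' ∈ cs.take i := by
        intro hm
        have := (pv_mem_iff_countP _).mp hm
        omega
      rw [if_pos hz]
      simp [hnmem]
    · have hmem : '+' ∈ cs.take i := by
        apply (pv_mem_iff_countP _).mpr
        intro h0; exact hz (by rw [h0]; simp)
      rw [if_neg hz]
      simp [hmem, hih]

-- ===== VERDICT (by name: the statement is the Claim_ definition above) =====
theorem simple_symbols_spec : Claim_equal_simple_symbols := by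
  intro word _
  unfold Spec_simple_symbols simple_symbols simple_symbols_alt
  rw [pv_main]
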